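-- pv_equiv track=rewrite | github.com/JeanAchamizo/comprejiada_algoritmica | datasetconfiguration.py | clean_adjacency_list
-- ===== SOURCE A (Python) =====
-- def clean_adjacency_list(adjacency_list):
--     keys = set(adjacency_list.keys())
--     cleaned_list = {}
--     for node, neighbors in adjacency_list.items():
--         filtered_neighbors = [neighbor for neighbor in neighbors if neighbor in keys and neighbor != node]
--         if filtered_neighbors:
--             cleaned_list[node] = filtered_neighbors
--
--     # Segundo filtrado para eliminar nodos no conectados
--     final_list = {node: neighbors for node, neighbors in cleaned_list.items() if any(node in nlist for nlist in cleaned_list.values())}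
--
--     return final_list
-- ===== SOURCE B (Python) =====
-- def clean_adjacency_list(adjacency_list):
--     # One pre-pass over the RAW input: every neighbor mentioned by a different node.
--     referenced = {n for node, nb in adjacency_list.items() for n in nb if n != node}
--     # Single output pass: no intermediate cleaned_list dict is ever built.
--     result = {}
--     for node, neighbors in adjacency_list.items():
--         if node in referenced:
--             kept = [n for n in neighbors if n in adjacency_list and n != node]
--             if kept:
--                 result[node] = kept
--     return result
-- ===== Notes on version B (the rewrite author's own statement) =====
-- stated objective: faster
-- what changed: B never builds A's intermediate cleaned_list dict: it derives the set of referenced nodes in one pre-pass directly from the raw adjacency lists (neighbors differing from their own node), then produces the final dict in a single loop over the original input, filtering neighbors and testing referencedness per node; A's staged cleaned_list construction and its per-node any-scan over all cleaned value lists both disappear.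
import Mathlib
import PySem

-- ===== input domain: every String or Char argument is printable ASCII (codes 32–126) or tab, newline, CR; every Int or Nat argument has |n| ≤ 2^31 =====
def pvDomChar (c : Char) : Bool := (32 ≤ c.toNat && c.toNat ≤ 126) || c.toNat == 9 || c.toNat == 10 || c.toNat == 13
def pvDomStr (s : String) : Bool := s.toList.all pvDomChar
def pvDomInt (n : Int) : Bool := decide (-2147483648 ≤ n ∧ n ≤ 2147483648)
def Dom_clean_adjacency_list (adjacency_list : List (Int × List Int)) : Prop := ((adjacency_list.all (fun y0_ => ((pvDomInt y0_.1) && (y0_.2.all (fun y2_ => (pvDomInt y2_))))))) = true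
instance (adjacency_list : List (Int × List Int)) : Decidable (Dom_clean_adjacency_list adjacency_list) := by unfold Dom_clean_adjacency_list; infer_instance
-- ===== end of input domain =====

-- B skips A's intermediate cleaned_list dict entirely: one pre-pass over the raw input
-- collects every neighbor referenced by a different node, then a single loop builds the
-- result (objective: faster, no per-node rescan of all cleaned value lists).


-- ===== PORT A =====
def clean_adjacency_list (adjacency_list : List (Int × List Int)) : List (Int × List Int) :=
  let keys : PySem.Set Int := PySem.Set.ofList (adjacency_list.map Prod.fst)
  -- for node, neighbors in adjacency_list.items(): if filtered_neighbors: cleaned_list[node] = filtered_neighbors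
  let cleaned_list : List (Int × List Int) := adjacency_list.foldl
    (fun acc p =>
      let filtered_neighbors := p.2.filter (fun n => keys.contains n && n != p.1)
      if !filtered_neighbors.isEmpty then acc ++ [(p.1, filtered_neighbors)] else acc) []
  -- {node: nb for node, nb in cleaned_list.items() if any(node in nlist for nlist in cleaned_list.values())}
  cleaned_list.filter (fun p => cleaned_list.any (fun q => q.2.contains p.1))

-- ===== PORT B =====
def clean_adjacency_list_alt (adjacency_list : List (Int × List Int)) : List (Int × List Int) :=
  -- referenced = {n for node, nb in adjacency_list.items() for n in nb if n != node}
  let referenced : PySem.Set Int :=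
    adjacency_list.foldl (fun s p => PySem.Set.update s (p.2.filter (fun n => n != p.1))) PySem.Set.empty
  -- for node, neighbors in adjacency_list.items(): if node in referenced: kept = [...]; if kept: result[node] = kept
  adjacency_list.foldl
    (fun acc p =>
      if referenced.contains p.1 then
        let kept := p.2.filter (fun n => (adjacency_list.map Prod.fst).contains n && n != p.1)
        if !kept.isEmpty then acc ++ [(p.1, kept)] else acc
      else acc) []

-- ===== PRECONDITION & SPEC =====
def Spec_clean_adjacency_list (adjacency_list : List (Int × List Int)) (out : List (Int × List Int)) : Prop := out = clean_adjacency_list_alt adjacency_list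
instance (adjacency_list : List (Int × List Int)) (out : List (Int × List Int)) : Decidable (Spec_clean_adjacency_list adjacency_list out) := by unfold Spec_clean_adjacency_list; infer_instance

-- ===== CLAIM (what is proved, stated in full; the proofs are below) =====
def Claim_equal_clean_adjacency_list : Prop := ∀ (adjacency_list : List (Int × List Int)), Dom_clean_adjacency_list adjacency_list → Spec_clean_adjacency_list adjacency_list (clean_adjacency_list adjacency_list)

-- ===== LEMMAS AND PROOFS =====

-- membership in B's referenced-set accumulator
theorem mem_foldl_update (f : Int × List Int → List Int) (l : List (Int × List Int))
    (s : PySem.Set Int) (x : Int) :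
    (x ∈ l.foldl (fun s p => PySem.Set.update s (f p)) s) ↔ (x ∈ s ∨ ∃ p ∈ l, x ∈ f p) := by
  induction l generalizing s with
  | nil => simp
  | cons h t ih =>
    simp only [List.foldl_cons, ih, PySem.Set.mem_update, List.mem_cons]
    constructor
    · rintro (⟨hs | hh⟩ | ⟨p, hp, hx⟩)
      · exact Or.inl hs
      · exact Or.inr ⟨h, Or.inl rfl, hh⟩
      · exact Or.inr ⟨p, Or.inr hp, hx⟩
    · rintro (hs | ⟨p, (rfl | hp), hx⟩)
      · exact Or.inl (Or.inl hs)
      · exact Or.inl (Or.inr hx)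
      · exact Or.inr ⟨p, hp, hx⟩

theorem clean_adjacency_list_eq (adjacency_list : List (Int × List Int)) :
    clean_adjacency_list adjacency_list = clean_adjacency_list_alt adjacency_list := by
  unfold clean_adjacency_list clean_adjacency_list_alt
  simp only
  set keysL := adjacency_list.map Prod.fst with hkeysL
  -- the two neighbor filters agree: set-of-keys membership = key-list membership
  have hf : ∀ n : Int, (PySem.Set.ofList keysL).contains n = keysL.contains n := by
    intro n
    rw [Bool.eq_iff_iff]
    simp
  set g : Int × List Int → Int × List Int :=
    fun p => (p.1, p.2.filter (fun n => keysL.contains n && n != p.1)) with hg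
  -- A's cleaned_list as filter-then-map over the input
  have hclean : adjacency_list.foldl
      (fun acc p =>
        let filtered_neighbors := p.2.filter (fun n => (PySem.Set.ofList keysL).contains n && n != p.1)
        if !filtered_neighbors.isEmpty then acc ++ [(p.1, filtered_neighbors)] else acc) [] =
      (adjacency_list.filter (fun p => !(g p).2.isEmpty)).map g := by
    have hfun : (fun (acc : List (Int × List Int)) (p : Int × List Int) =>
        let filtered_neighbors := p.2.filter (fun n => (PySem.Set.ofList keysL).contains n && n != p.1)
        if !filtered_neighbors.isEmpty then acc ++ [(p.1, filtered_neighbors)] else acc) =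
        (fun acc p => if !(g p).2.isEmpty then acc ++ [g p] else acc) := by
      funext acc p
      simp only [hg, hf]
    rw [hfun, PySem.List.foldl_append_if]; simp
  rw [hclean]
  set C := (adjacency_list.filter (fun p => !(g p).2.isEmpty)).map g with hC
  -- B's loop as filter-then-map over the input
  have hB : adjacency_list.foldl
      (fun acc p =>
        if (adjacency_list.foldl (fun s p => PySem.Set.update s (p.2.filter (fun n => n != p.1)))
              PySem.Set.empty).contains p.1 then
          let kept := p.2.filter (fun n => keysL.contains n && n != p.1)
          if !kept.isEmpty then acc ++ [(p.1, kept)] else acc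
        else acc) [] =
      (adjacency_list.filter (fun p =>
        (adjacency_list.foldl (fun s p => PySem.Set.update s (p.2.filter (fun n => n != p.1)))
            PySem.Set.empty).contains p.1 && !(g p).2.isEmpty)).map g := by
    have hfun : (fun (acc : List (Int × List Int)) (p : Int × List Int) =>
        if (adjacency_list.foldl (fun s p => PySem.Set.update s (p.2.filter (fun n => n != p.1)))
              PySem.Set.empty).contains p.1 then
          let kept := p.2.filter (fun n => keysL.contains n && n != p.1)
          if !kept.isEmpty then acc ++ [(p.1, kept)] else acc
        else acc) =
        (fun acc p => if (adjacency_list.foldl (fun s p => PySem.Set.update s (p.2.filter (fun n => n != p.1)))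
            PySem.Set.empty).contains p.1 && !(g p).2.isEmpty then acc ++ [g p] else acc) := by
      funext acc p
      cases h1 : (adjacency_list.foldl (fun s p => PySem.Set.update s (p.2.filter (fun n => n != p.1)))
          PySem.Set.empty).contains p.1 <;> simp [hg]
    rw [hfun, PySem.List.foldl_append_if]; simp
  rw [hB]
  rw [hC, List.filter_map, ← List.filter_filter, ← hC]
  congr 1
  apply List.filter_congr
  intro p hp
  have hmem : p ∈ adjacency_list := (List.mem_filter.mp hp).1
  have hmemkeys : p.1 ∈ keysL := List.mem_map_of_mem hmem
  rw [Bool.eq_iff_iff]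
  simp only [Function.comp_apply, List.any_eq_true, List.contains_iff_mem,
    PySem.Set.contains_eq_listContains]
  constructor
  · rintro ⟨q, hq, hq1⟩
    rw [hC] at hq
    obtain ⟨r, hr, rfl⟩ := List.mem_map.mp hq
    have hr' := (List.mem_filter.mp hr).1
    simp only [hg, List.mem_filter, Bool.and_eq_true, bne_iff_ne, ne_eq,
      List.contains_iff_mem] at hq1
    obtain ⟨ha, _, hc⟩ := hq1
    rw [mem_foldl_update]
    exact Or.inr ⟨r, hr', List.mem_filter.mpr ⟨ha, by simp [bne_iff_ne, hc]⟩⟩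
  · intro h1
    rw [mem_foldl_update] at h1
    rcases h1 with h1 | ⟨r, hr, hx⟩
    · simp [PySem.Set.empty] at h1
    · have hx' := List.mem_filter.mp hx
      have hxne : p.1 ≠ r.1 := by simpa [bne_iff_ne] using hx'.2
      have hpin : p.1 ∈ (g r).2 := by
        simp only [hg]
        exact List.mem_filter.mpr ⟨hx'.1, by simp [hmemkeys, bne_iff_ne, hxne]⟩
      refine ⟨g r, ?_, hpin⟩
      rw [hC]
      exact List.mem_map_of_mem (List.mem_filter.mpr ⟨hr,
        by simpa [List.isEmpty_iff] using List.ne_nil_of_mem hpin⟩)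

-- ===== VERDICT (by name: the statement is the Claim_ definition above) =====
theorem clean_adjacency_list_spec : Claim_equal_clean_adjacency_list := by
  intro l _
  unfold Spec_clean_adjacency_list
  exact clean_adjacency_list_eq l
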